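-- pv_equiv track=rewrite | github.com/DaniFdezAlvarez/shexer | test/t_utils.py | filter_prefixes_str_shex
-- ===== SOURCE A (Python) =====
-- def filter_prefixes_str_shex(target_str):
--     result = []
--     lines = target_str.split("\n")
--     counter = 0
--     while len(lines) > counter:
--         if not lines[counter].startswith("PREFIX"):
--             break
--         counter += 1
--     return "\n".join(lines[counter:]).strip() if counter > 0 else target_str
-- ===== SOURCE B (Python) =====
-- def filter_prefixes_str_shex(target_str):
--     if not target_str.startswith("PREFIX"):
--         return target_str
--     s = target_str
--     while s.startswith("PREFIX"):
--         i = s.find("\n")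
--         if i == -1:
--             s = ""
--             break
--         s = s[i + 1:]
--     return s.strip()
-- ===== Notes on version B (the rewrite author's own statement) =====
-- stated objective: alternative
-- what changed: B never builds the list of lines: it drops leading PREFIX lines directly from the raw string by repeated find('\n')/slice, instead of A's split-into-lines, index-counting while loop and re-join.
import Mathlib
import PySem

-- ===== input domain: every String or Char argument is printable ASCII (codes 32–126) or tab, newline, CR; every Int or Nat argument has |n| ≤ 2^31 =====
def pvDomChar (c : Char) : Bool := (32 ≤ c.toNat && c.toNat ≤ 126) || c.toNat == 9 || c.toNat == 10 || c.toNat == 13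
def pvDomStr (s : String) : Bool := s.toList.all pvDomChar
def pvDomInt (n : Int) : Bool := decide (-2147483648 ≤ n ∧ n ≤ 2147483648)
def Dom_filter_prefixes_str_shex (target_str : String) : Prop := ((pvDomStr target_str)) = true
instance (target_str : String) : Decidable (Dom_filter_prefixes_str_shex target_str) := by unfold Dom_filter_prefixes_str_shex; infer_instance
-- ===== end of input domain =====

-- B strips the leading PREFIX lines directly off the raw string (find('\n') + slice) instead of
-- A's split-into-lines / index-counting while loop / re-join; an alternative of the same cost.

-- ===== PORT A =====
-- A's while loop: how many leading lines start with "PREFIX"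
def pvCountA (lines : List (List Char)) : Nat :=
  match lines with
  | [] => 0
  | l :: rest => if PySem.Chars.startswith l "PREFIX".toList then pvCountA rest + 1 else 0

def filter_prefixes_str_shex (target_str : String) : String :=
  let lines := PySem.Chars.splitOn target_str.toList "\n".toList
  let counter := pvCountA lines
  if counter > 0 then
    String.ofList (PySem.Chars.strip (PySem.Chars.join "\n".toList (lines.drop counter)))
  else target_str

-- ===== PORT B =====
-- termination of B's while loop: the slice past the first '\n' is strictly shorter
theorem pvDropB_dec (cs : List Char) (hs : PySem.Chars.startswith cs "PREFIX".toList = true)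
    (hi : PySem.Chars.find cs "\n".toList ≠ -1) :
    (PySem.List.slice cs (some (PySem.Chars.find cs "\n".toList + 1)) none).length < cs.length := by
  have h0 : -1 ≤ PySem.Chars.find cs "\n".toList := PySem.Chars.neg_one_le_find cs "\n".toList
  have h1 : (0:Int) ≤ PySem.Chars.find cs "\n".toList + 1 := by omega
  rw [PySem.List.slice_from cs h1]
  have hne : cs ≠ [] := by
    intro hnil; subst hnil
    rw [PySem.Chars.startswith_iff] at hs
    have := hs.length_le
    simp at this
  have hp : 0 < cs.length := List.length_pos_iff.mpr hne
  have ht : 0 < (PySem.Chars.find cs "\n".toList + 1).toNat := by omega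
  rw [List.length_drop]
  omega

-- B's while loop: repeatedly drop everything up to and including the first '\n'
def pvDropB (cs : List Char) : List Char :=
  if hs : PySem.Chars.startswith cs "PREFIX".toList then
    let i := PySem.Chars.find cs "\n".toList
    if h : i = -1 then []
    else pvDropB (PySem.List.slice cs (some (i + 1)) none)
  else cs
termination_by cs.length
decreasing_by
  exact pvDropB_dec cs hs h

def filter_prefixes_str_shex_alt (target_str : String) : String :=
  if PySem.Chars.startswith target_str.toList "PREFIX".toList then
    String.ofList (PySem.Chars.strip (pvDropB target_str.toList))
  else target_str

-- ===== PRECONDITION & SPEC =====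
def Spec_filter_prefixes_str_shex (target_str : String) (out : String) : Prop := out = filter_prefixes_str_shex_alt target_str
instance (target_str : String) (out : String) : Decidable (Spec_filter_prefixes_str_shex target_str out) := by unfold Spec_filter_prefixes_str_shex; infer_instance

-- ===== CLAIM (what is proved, stated in full; the proofs are below) =====
def Claim_equal_filter_prefixes_str_shex : Prop := ∀ (target_str : String), Dom_filter_prefixes_str_shex target_str → Spec_filter_prefixes_str_shex target_str (filter_prefixes_str_shex target_str)

-- ===== LEMMAS AND PROOFS =====

-- reference splitter: split on '\n', carrying the current piece in order
def pvSplitNl (pre : List Char) : List Char → List (List Char)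
  | [] => [pre]
  | c :: rest => if c = '\n' then pre :: pvSplitNl [] rest else pvSplitNl (pre ++ [c]) rest

theorem pvSplitNl_nil (pre : List Char) : pvSplitNl pre [] = [pre] := rfl

theorem pvSplitNl_cons_nl (pre rest : List Char) :
    pvSplitNl pre ('\n' :: rest) = pre :: pvSplitNl [] rest := by
  rw [pvSplitNl]; simp

theorem pvSplitNl_cons_ne (pre : List Char) (c : Char) (rest : List Char) (hc : c ≠ '\n') :
    pvSplitNl pre (c :: rest) = pvSplitNl (pre ++ [c]) rest := by
  rw [pvSplitNl]; simp [hc]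

theorem pvSplitNl_ne_nil (pre cs : List Char) : pvSplitNl pre cs ≠ [] := by
  induction cs generalizing pre with
  | nil => simp [pvSplitNl_nil]
  | cons c rest ih =>
    by_cases hc : c = '\n'
    · subst hc; rw [pvSplitNl_cons_nl]; simp
    · rw [pvSplitNl_cons_ne _ _ _ hc]; exact ih _

-- PySem's fuelled splitter computes pvSplitNl
theorem pvGo_eq (fuel : Nat) (cs cur : List Char) (acc' : List (List Char))
    (h : cs.length < fuel) :
    PySem.Chars.splitOn.go ['\n'] fuel cs cur acc' = acc'.reverse ++ pvSplitNl cur.reverse cs := by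
  induction fuel generalizing cs cur acc' with
  | zero => omega
  | succ n ih =>
    match cs, h with
    | [], _ =>
      rw [PySem.Chars.splitOn.go.eq_def]
      simp [pvSplitNl_nil]
    | c :: rest, h =>
      rw [PySem.Chars.splitOn.go.eq_def]
      by_cases hc : c = '\n'
      · subst hc
        have hp : List.isPrefixOf ['\n'] ('\n' :: rest) = true := by
          simp [List.isPrefixOf]
        simp only [hp, if_true]
        have e1 : List.drop (['\n'] : List Char).length ('\n' :: rest) = rest := rfl
        rw [e1, ih rest [] (cur.reverse :: acc') (by simp at h; omega)]
        rw [pvSplitNl_cons_nl]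
        simp
      · have hp : List.isPrefixOf ['\n'] (c :: rest) = false := by
          simp [List.isPrefixOf]
          exact fun hh => absurd hh.symm hc
        simp only [hp, Bool.false_eq_true, if_false]
        rw [ih rest (c :: cur) acc' (by simp at h; omega)]
        rw [pvSplitNl_cons_ne _ _ _ hc]
        simp

theorem pvSplitOn_eq (cs : List Char) :
    PySem.Chars.splitOn cs "\n".toList = pvSplitNl [] cs := by
  have e : "\n".toList = ['\n'] := rfl
  rw [e, PySem.Chars.splitOn, pvGo_eq (cs.length + 1) cs [] [] (by omega)]
  simp

theorem pvJoin_splitNl (cs pre : List Char) :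
    PySem.Chars.join ['\n'] (pvSplitNl pre cs) = pre ++ cs := by
  induction cs generalizing pre with
  | nil => rw [pvSplitNl_nil, PySem.Chars.join_singleton]; simp
  | cons c rest ih =>
    by_cases hc : c = '\n'
    · subst hc
      rw [pvSplitNl_cons_nl]
      cases hsp : pvSplitNl [] rest with
      | nil => exact absurd hsp (pvSplitNl_ne_nil _ _)
      | cons q t =>
        rw [PySem.Chars.join_cons_cons]
        have := ih ([] : List Char)
        rw [hsp] at this
        rw [this]
        simp
    · rw [pvSplitNl_cons_ne _ _ _ hc, ih]
      simp

theorem pvSplitNl_no_nl (cs pre : List Char) (h : '\n' ∉ cs) : pvSplitNl pre cs = [pre ++ cs] := by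
  induction cs generalizing pre with
  | nil => simp [pvSplitNl_nil]
  | cons c rest ih =>
    have hc : c ≠ '\n' := fun hh => h (hh ▸ List.mem_cons_self)
    rw [pvSplitNl_cons_ne _ _ _ hc, ih _ (fun hm => h (List.mem_cons_of_mem _ hm))]
    simp

theorem pvSplitNl_first_nl (xs ys pre : List Char) (h : '\n' ∉ xs) :
    pvSplitNl pre (xs ++ '\n' :: ys) = (pre ++ xs) :: pvSplitNl [] ys := by
  induction xs generalizing pre with
  | nil => simp [pvSplitNl_cons_nl]
  | cons x xt ih =>
    have hx : x ≠ '\n' := fun hh => h (hh ▸ List.mem_cons_self)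
    rw [List.cons_append, pvSplitNl_cons_ne _ _ _ hx,
      ih _ (fun hm => h (List.mem_cons_of_mem _ hm))]
    simp

-- "PREFIX" contains no '\n', so the first line starts with it iff the whole string does
theorem pvHead_startswith (xs ys : List Char) :
    ("PREFIX".toList <+: (xs ++ '\n' :: ys)) ↔ ("PREFIX".toList <+: xs) := by
  constructor
  · intro hp
    by_cases hlen : "PREFIX".toList.length ≤ xs.length
    · have he := List.prefix_iff_eq_take.mp hp
      rw [List.take_append_of_le_length hlen] at he
      exact he ▸ List.take_prefix _ _
    · exfalso
      have hlt : xs.length < "PREFIX".toList.length := by omega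
      have hg := hp.getElem (i := xs.length) hlt
      rw [List.getElem_append_right (le_refl xs.length)] at hg
      simp at hg
      have : '\n' ∈ "PREFIX".toList := hg ▸ List.getElem_mem hlt
      revert this; decide
  · intro hp
    exact hp.trans (List.prefix_append xs _)

theorem pvMemNl (cs : List Char) : (['\n'] <:+: cs) ↔ '\n' ∈ cs := by
  constructor
  · intro h; exact h.mem (by simp)
  · intro h
    obtain ⟨s, t, rfl⟩ := List.append_of_mem h
    exact ⟨s, t, by simp⟩

-- Chars.find decomposes the string at its first '\n'
theorem pvFirstNl (cs : List Char) (h : 0 ≤ PySem.Chars.find cs ['\n']) :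
    cs = cs.take (PySem.Chars.find cs ['\n']).toNat
        ++ '\n' :: cs.drop ((PySem.Chars.find cs ['\n']).toNat + 1)
      ∧ '\n' ∉ cs.take (PySem.Chars.find cs ['\n']).toNat := by
  obtain ⟨hpre, hmin⟩ := PySem.Chars.find_spec h
  set k := (PySem.Chars.find cs ['\n']).toNat with hk
  obtain ⟨t, ht⟩ := hpre
  simp only [List.singleton_append] at ht
  have hdrop : cs.drop k = '\n' :: t := ht.symm
  have hklt : k < cs.length := by
    by_contra hge
    rw [List.drop_eq_nil_of_le (by omega)] at hdrop
    simp at hdrop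
  have htake : '\n' ∉ cs.take k := by
    intro hm
    obtain ⟨j, hj, hje⟩ := List.mem_iff_getElem.mp hm
    have hjlen : j < (cs.take k).length := hj
    rw [List.getElem_take] at hje
    have hjlt : j < k := by simp at hj; omega
    exact hmin j hjlt ⟨cs.drop (j+1), by
      rw [List.singleton_append, ← hje, ← List.drop_eq_getElem_cons]⟩
  refine ⟨?_, htake⟩
  conv_lhs => rw [← List.take_append_drop k cs]
  rw [hdrop]
  congr 1
  have : t = (cs.drop k).drop 1 := by rw [hdrop]; simp
  rw [this, List.drop_drop]

theorem pvCountA_cons (l : List Char) (rest : List (List Char)) :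
    pvCountA (l :: rest) = if PySem.Chars.startswith l "PREFIX".toList then pvCountA rest + 1 else 0 := rfl

theorem pvStartswith_nil : PySem.Chars.startswith ([] : List Char) "PREFIX".toList = false := by decide

theorem pvCount_eq_zero (cs : List Char)
    (hs : PySem.Chars.startswith cs "PREFIX".toList = false) :
    pvCountA (pvSplitNl [] cs) = 0 := by
  rw [Bool.eq_false_iff, Ne, PySem.Chars.startswith_iff] at hs
  by_cases hm : '\n' ∈ cs
  · have hf : 0 ≤ PySem.Chars.find cs ['\n'] :=
      (PySem.Chars.find_nonneg_iff cs ['\n']).mpr ((pvMemNl cs).mpr hm)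
    obtain ⟨hdec, hno⟩ := pvFirstNl cs hf
    rw [hdec] at hs ⊢
    rw [pvSplitNl_first_nl _ _ _ hno]
    simp only [List.nil_append]
    have hxs : PySem.Chars.startswith (cs.take (PySem.Chars.find cs ['\n']).toNat) "PREFIX".toList = false := by
      rw [Bool.eq_false_iff, Ne, PySem.Chars.startswith_iff]
      exact fun hp => hs ((pvHead_startswith _ _).mpr hp)
    rw [pvCountA_cons, hxs]
    simp
  · rw [pvSplitNl_no_nl _ _ hm]
    simp only [List.nil_append]
    have hcs : PySem.Chars.startswith cs "PREFIX".toList = false := by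
      rw [Bool.eq_false_iff, Ne, PySem.Chars.startswith_iff]; exact hs
    rw [pvCountA_cons, hcs]
    simp

theorem pvCount_pos (cs : List Char)
    (hs : PySem.Chars.startswith cs "PREFIX".toList = true) :
    0 < pvCountA (pvSplitNl [] cs) := by
  rw [PySem.Chars.startswith_iff] at hs
  by_cases hm : '\n' ∈ cs
  · have hf : 0 ≤ PySem.Chars.find cs ['\n'] :=
      (PySem.Chars.find_nonneg_iff cs ['\n']).mpr ((pvMemNl cs).mpr hm)
    obtain ⟨hdec, hno⟩ := pvFirstNl cs hf
    rw [hdec] at hs ⊢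
    rw [pvSplitNl_first_nl _ _ _ hno]
    simp only [List.nil_append]
    have hxs : PySem.Chars.startswith (cs.take (PySem.Chars.find cs ['\n']).toNat) "PREFIX".toList = true := by
      rw [PySem.Chars.startswith_iff]
      exact (pvHead_startswith _ _).mp hs
    rw [pvCountA_cons, hxs]
    simp
  · rw [pvSplitNl_no_nl _ _ hm]
    simp only [List.nil_append]
    have hcs : PySem.Chars.startswith cs "PREFIX".toList = true := by
      rw [PySem.Chars.startswith_iff]; exact hs
    rw [pvCountA_cons, hcs]
    simp

-- B's loop computes exactly A's join-of-remaining-lines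
theorem pvMainAux (n : Nat) : ∀ cs : List Char, cs.length ≤ n →
    pvDropB cs =
      PySem.Chars.join ['\n'] ((pvSplitNl [] cs).drop (pvCountA (pvSplitNl [] cs))) := by
  induction n with
  | zero =>
    intro cs hlen
    have : cs = [] := List.eq_nil_of_length_eq_zero (by omega)
    subst this
    rw [pvDropB, dif_neg (by rw [pvStartswith_nil]; simp)]
    have hnil : pvSplitNl ([] : List Char) [] = [([] : List Char)] := rfl
    rw [hnil, pvCountA_cons, pvStartswith_nil]
    simp [PySem.Chars.join_singleton]
  | succ n ih =>
    intro cs hlen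
    cases hs : PySem.Chars.startswith cs "PREFIX".toList with
    | false =>
      rw [pvDropB, dif_neg (by rw [hs]; simp), pvCount_eq_zero cs hs, List.drop_zero]
      exact (pvJoin_splitNl cs []).symm
    | true =>
      have e : "\n".toList = ['\n'] := rfl
      by_cases hfind : PySem.Chars.find cs "\n".toList = -1
      · rw [pvDropB, dif_pos hs, dif_pos hfind]
        rw [e] at hfind
        have hm : '\n' ∉ cs := fun hm =>
          ((PySem.Chars.find_eq_neg_one_iff cs ['\n']).mp hfind) ((pvMemNl cs).mpr hm)
        rw [pvSplitNl_no_nl _ _ hm]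
        simp only [List.nil_append]
        rw [pvCountA_cons, hs]
        simp [PySem.Chars.join_nil]
      · have hf : 0 ≤ PySem.Chars.find cs ['\n'] := by
          have := PySem.Chars.neg_one_le_find cs ['\n']
          rw [e] at hfind
          omega
        set k := (PySem.Chars.find cs ['\n']).toNat with hk
        obtain ⟨hdec, hno⟩ := pvFirstNl cs hf
        have hslice : PySem.List.slice cs (some (PySem.Chars.find cs "\n".toList + 1)) none
            = cs.drop (k + 1) := by
          rw [PySem.List.slice_from cs (by rw [e]; omega)]
          congr 1
          rw [e]
          omega
        rw [pvDropB, dif_pos hs, dif_neg hfind, hslice]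
        have hlen' : (cs.drop (k + 1)).length ≤ n := by
          have h1 := List.length_drop (l := cs) (i := k + 1)
          have h2 : 0 < cs.length := by
            rw [hdec]; simp
          have h3 : cs.length ≤ n + 1 := hlen
          have h4 : (cs.drop (k+1)).length < cs.length := by
            rw [h1]; omega
          omega
        rw [ih _ hlen']
        conv_rhs => rw [hdec]
        rw [pvSplitNl_first_nl _ _ _ hno]
        simp only [List.nil_append]
        have hxs : PySem.Chars.startswith (cs.take (PySem.Chars.find cs ['\n']).toNat) "PREFIX".toList = true := by
          rw [PySem.Chars.startswith_iff]
          rw [PySem.Chars.startswith_iff] at hs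
          rw [hdec] at hs
          exact (pvHead_startswith _ _).mp hs
        rw [pvCountA_cons, hxs]
        simp
        rfl

theorem pvMain (cs : List Char) :
    pvDropB cs =
      PySem.Chars.join ['\n'] ((pvSplitNl [] cs).drop (pvCountA (pvSplitNl [] cs))) :=
  pvMainAux cs.length cs le_rfl

-- ===== VERDICT (by name: the statement is the Claim_ definition above) =====
theorem filter_prefixes_str_shex_spec : Claim_equal_filter_prefixes_str_shex := by
  intro s _
  unfold Spec_filter_prefixes_str_shex filter_prefixes_str_shex filter_prefixes_str_shex_alt
  cases hs : PySem.Chars.startswith s.toList "PREFIX".toList with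
  | false =>
    simp only [Bool.false_eq_true, if_false]
    rw [pvSplitOn_eq, pvCount_eq_zero _ hs]
    simp
  | true =>
    simp only [if_true]
    rw [pvSplitOn_eq]
    have hpos := pvCount_pos _ hs
    rw [if_pos (by omega)]
    have e : "\n".toList = ['\n'] := rfl
    rw [e, ← pvMain]
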